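-- pv_equiv track=rewrite | github.com/insighio/insighioNode | insighioNode/lib/networking/modem/modem_bg600.py | extract_topic_message_without_regex
-- ===== SOURCE A (Python) =====
-- def extract_topic_message_without_regex(line):
--     topic = ""
--     message = ""
--     topic_reached = False
--     topic_parsed = False
--     message_reached = False
--
--     i = -1
--     last_quote_index = len(line)
--     message_quote_index = 0
--     for c in list(line):
--         i += 1
--         if c == '"':
--             if not topic_reached:
--                 topic_reached = True
--                 continue
--             elif topic_reached and not topic_parsed:
--                 topic_parsed = True
--                 continue
--             elif topic_parsed and not message_reached:
--                 message_reached = True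
--                 message_quote_index = i
--                 continue
--             else:
--                 last_quote_index = i
--
--         if topic_reached and not topic_parsed:
--             topic += c
--         elif message_reached:
--             message += c
--
--     res = dict()
--     res["topic"] = topic
--     res["message"] = message[0 : (last_quote_index - message_quote_index - 1)]
--     return res
-- ===== SOURCE B (Python) =====
-- def extract_topic_message_without_regex(line):
--     quotes = [i for i, c in enumerate(line) if c == '"']
--     if len(quotes) >= 2:
--         topic = line[quotes[0] + 1:quotes[1]]
--     elif len(quotes) == 1:
--         topic = line[quotes[0] + 1:]
--     else:
--         topic = ""
--     if len(quotes) >= 4: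
--         message = line[quotes[2] + 1:quotes[-1]]
--     elif len(quotes) == 3:
--         message = line[quotes[2] + 1:]
--     else:
--         message = ""
--     return {"topic": topic, "message": message}
-- ===== Notes on version B (the rewrite author's own statement) =====
-- stated objective: simpler
-- what changed: Replaces A's per-character boolean state machine (flags, running index, manual character accumulation) by computing the list of quote positions once and reading topic and message off with four slices.
import Mathlib
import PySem

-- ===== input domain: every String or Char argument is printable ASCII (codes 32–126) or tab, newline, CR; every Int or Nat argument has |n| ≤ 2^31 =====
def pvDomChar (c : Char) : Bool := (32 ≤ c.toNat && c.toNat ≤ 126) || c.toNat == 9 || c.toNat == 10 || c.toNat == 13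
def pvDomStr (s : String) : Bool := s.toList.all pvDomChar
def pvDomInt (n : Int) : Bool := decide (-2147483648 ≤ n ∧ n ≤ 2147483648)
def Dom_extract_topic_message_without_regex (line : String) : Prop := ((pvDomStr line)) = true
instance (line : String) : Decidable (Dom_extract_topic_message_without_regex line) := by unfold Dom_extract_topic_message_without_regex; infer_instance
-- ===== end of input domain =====

-- B replaces A's per-character boolean state machine by a quote-index table plus four slices (objective: simpler).

-- ===== PORT A =====
-- loop state of A: topic, message, topic_reached, topic_parsed, message_reached, i, last_quote_index, message_quote_index
structure PvStA where
  topic : List Char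
  msg : List Char
  tr : Bool
  tp : Bool
  mr : Bool
  i : Int
  lq : Int
  mq : Int

-- one iteration of A's for-loop (the trailing append section is duplicated into the
-- quote branch without `continue`, exactly as Python's control flow reaches it)
def pvStepA (st : PvStA) (c : Char) : PvStA :=
  let i := st.i + 1
  if c = '"' then
    if !st.tr then { st with tr := true, i := i }
    else if st.tr && !st.tp then { st with tp := true, i := i }
    else if st.tp && !st.mr then { st with mr := true, mq := i, i := i }
    else
      let st' := { st with lq := i, i := i }
      if st'.tr && !st'.tp then { st' with topic := st'.topic ++ [c] }
      else if st'.mr then { st' with msg := st'.msg ++ [c] }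
      else st'
  else
    let st' := { st with i := i }
    if st'.tr && !st'.tp then { st' with topic := st'.topic ++ [c] }
    else if st'.mr then { st' with msg := st'.msg ++ [c] }
    else st'

def extract_topic_message_without_regex (line : String) : List (String × String) :=
  let s := line.toList.foldl pvStepA
    { topic := [], msg := [], tr := false, tp := false, mr := false,
      i := -1, lq := PySem.Str.len line, mq := 0 }
  [("topic", String.ofList s.topic),
   ("message", String.ofList (PySem.List.slice s.msg (some 0) (some (s.lq - s.mq - 1))))]

-- ===== PORT B =====
-- [i for i, c in enumerate(line) if c == '"']
def pvQuotesFrom (cs : List Char) (s : Int) : List Int :=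
  ((PySem.List.enumerate cs s).filter (fun p => p.2 == '"')).map (·.1)

def extract_topic_message_without_regex_alt (line : String) : List (String × String) :=
  let cs := line.toList
  let quotes := pvQuotesFrom cs 0
  let n := quotes.length
  let topic :=
    if 2 ≤ n then PySem.List.slice cs (some (PySem.List.pyGetD quotes 0 0 + 1)) (some (PySem.List.pyGetD quotes 1 0))
    else if n = 1 then PySem.List.slice cs (some (PySem.List.pyGetD quotes 0 0 + 1)) none
    else []
  let message :=
    if 4 ≤ n then PySem.List.slice cs (some (PySem.List.pyGetD quotes 2 0 + 1)) (some (PySem.List.pyGetD quotes (-1) 0))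
    else if n = 3 then PySem.List.slice cs (some (PySem.List.pyGetD quotes 2 0 + 1)) none
    else []
  [("topic", String.ofList topic), ("message", String.ofList message)]

-- ===== PRECONDITION & SPEC =====
def Spec_extract_topic_message_without_regex (line : String) (out : List (String × String)) : Prop := out = extract_topic_message_without_regex_alt line
instance (line : String) (out : List (String × String)) : Decidable (Spec_extract_topic_message_without_regex line out) := by unfold Spec_extract_topic_message_without_regex; infer_instance

-- ===== CLAIM (what is proved, stated in full; the proofs are below) =====
def Claim_equal_extract_topic_message_without_regex : Prop := ∀ (line : String), Dom_extract_topic_message_without_regex line → Spec_extract_topic_message_without_regex line (extract_topic_message_without_regex line)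

-- ===== LEMMAS AND PROOFS =====

-- ---- pvQuotesFrom facts ----
theorem pvQf_append (u v : List Char) (s : Int) :
    pvQuotesFrom (u ++ v) s = pvQuotesFrom u s ++ pvQuotesFrom v (s + u.length) := by
  simp [pvQuotesFrom, PySem.List.enumerate_append]

theorem pvQf_quote_cons (v : List Char) (s : Int) :
    pvQuotesFrom ('"' :: v) s = s :: pvQuotesFrom v (s + 1) := by
  simp [pvQuotesFrom, PySem.List.enumerate_cons]

theorem pvQf_noq (u : List Char) (h : '"' ∉ u) (s : Int) : pvQuotesFrom u s = [] := by
  induction u generalizing s with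
  | nil => rfl
  | cons c r ih =>
    have hc : ¬ (c = '"') := fun hc => h (by simp [hc])
    have hr : '"' ∉ r := fun hm => h (List.mem_cons_of_mem _ hm)
    simp [pvQuotesFrom, PySem.List.enumerate_cons, hc]
    simpa [pvQuotesFrom] using ih hr (s + 1)

-- ---- A's loop, phase by phase ----
theorem pvFoldA0 (u : List Char) (h : '"' ∉ u) (T M : List Char) (i lq mq : Int) :
    u.foldl pvStepA ⟨T, M, false, false, false, i, lq, mq⟩ =
      ⟨T, M, false, false, false, i + u.length, lq, mq⟩ := by
  induction u generalizing i with
  | nil => simp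
  | cons c r ih =>
    have hc : ¬ (c = '"') := fun hc => h (by simp [hc])
    have hr : '"' ∉ r := fun hm => h (List.mem_cons_of_mem _ hm)
    rw [List.foldl_cons]
    have hstep : pvStepA ⟨T, M, false, false, false, i, lq, mq⟩ c =
        ⟨T, M, false, false, false, i + 1, lq, mq⟩ := by simp [pvStepA, hc]
    rw [hstep, ih hr]
    simp; omega

theorem pvFoldA1 (u : List Char) (h : '"' ∉ u) (T : List Char) (i lq mq : Int) :
    u.foldl pvStepA ⟨T, [], true, false, false, i, lq, mq⟩ =
      ⟨T ++ u, [], true, false, false, i + u.length, lq, mq⟩ := by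
  induction u generalizing T i with
  | nil => simp
  | cons c r ih =>
    have hc : ¬ (c = '"') := fun hc => h (by simp [hc])
    have hr : '"' ∉ r := fun hm => h (List.mem_cons_of_mem _ hm)
    rw [List.foldl_cons]
    have hstep : pvStepA ⟨T, [], true, false, false, i, lq, mq⟩ c =
        ⟨T ++ [c], [], true, false, false, i + 1, lq, mq⟩ := by simp [pvStepA, hc]
    rw [hstep, ih hr]
    simp; omega

theorem pvFoldA2 (u : List Char) (h : '"' ∉ u) (T M : List Char) (i lq mq : Int) :
    u.foldl pvStepA ⟨T, M, true, true, false, i, lq, mq⟩ =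
      ⟨T, M, true, true, false, i + u.length, lq, mq⟩ := by
  induction u generalizing i with
  | nil => simp
  | cons c r ih =>
    have hc : ¬ (c = '"') := fun hc => h (by simp [hc])
    have hr : '"' ∉ r := fun hm => h (List.mem_cons_of_mem _ hm)
    rw [List.foldl_cons]
    have hstep : pvStepA ⟨T, M, true, true, false, i, lq, mq⟩ c =
        ⟨T, M, true, true, false, i + 1, lq, mq⟩ := by simp [pvStepA, hc]
    rw [hstep, ih hr]
    simp; omega

-- last_quote_index as computed by A's phase-3 loop
def pvLq3 : List Char → Int → Int → Int
  | [], _, lq => lq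
  | c :: r, i, lq => pvLq3 r (i + 1) (if c = '"' then i + 1 else lq)

theorem pvFoldA3 (cs : List Char) (T M : List Char) (i lq mq : Int) :
    cs.foldl pvStepA ⟨T, M, true, true, true, i, lq, mq⟩ =
      ⟨T, M ++ cs, true, true, true, i + cs.length, pvLq3 cs i lq, mq⟩ := by
  induction cs generalizing M i lq with
  | nil => simp [pvLq3]
  | cons c r ih =>
    rw [List.foldl_cons]
    by_cases hc : c = '"'
    · subst hc
      have hstep : pvStepA ⟨T, M, true, true, true, i, lq, mq⟩ '"' =
          ⟨T, M ++ ['"'], true, true, true, i + 1, i + 1, mq⟩ := by simp [pvStepA]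
      rw [hstep, ih]
      rw [show (pvLq3 ('"' :: r) i lq) = pvLq3 r (i + 1) (i + 1) by simp [pvLq3]]
      simp; omega
    · have hstep : pvStepA ⟨T, M, true, true, true, i, lq, mq⟩ c =
          ⟨T, M ++ [c], true, true, true, i + 1, lq, mq⟩ := by simp [pvStepA, hc]
      rw [hstep, ih]
      rw [show (pvLq3 (c :: r) i lq) = pvLq3 r (i + 1) lq by simp [pvLq3, hc]]
      simp; omega

theorem pvLq3_noq (u : List Char) (h : '"' ∉ u) (i lq : Int) : pvLq3 u i lq = lq := by
  induction u generalizing i with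
  | nil => rfl
  | cons c r ih =>
    have hc : ¬ (c = '"') := fun hc => h (by simp [hc])
    have hr : '"' ∉ r := fun hm => h (List.mem_cons_of_mem _ hm)
    simp [pvLq3, hc, ih hr]

theorem pvLq3_append (xs ys : List Char) (i lq : Int) :
    pvLq3 (xs ++ ys) i lq = pvLq3 ys (i + xs.length) (pvLq3 xs i lq) := by
  induction xs generalizing i lq with
  | nil => simp [pvLq3]
  | cons c r ih =>
    simp only [List.cons_append, pvLq3, ih]
    congr 1
    simp; omega

-- ---- splitting a char list at its first / last '"' ----
theorem pvSplitFirst (cs : List Char) (h : '"' ∈ cs) :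
    ∃ u v, cs = u ++ '"' :: v ∧ '"' ∉ u := by
  induction cs with
  | nil => cases h
  | cons c r ih =>
    by_cases hc : c = '"'
    · exact ⟨[], r, by simp [hc], by simp⟩
    · have hr : '"' ∈ r := by
        rcases List.mem_cons.mp h with h1 | h1
        · exact absurd h1.symm hc
        · exact h1
      obtain ⟨u, v, e, hu⟩ := ih hr
      exact ⟨c :: u, v, by simp [e], by simpa [hu] using fun he => hc he.symm⟩

theorem pvSplitLast (cs : List Char) (h : '"' ∈ cs) :
    ∃ m w, cs = m ++ '"' :: w ∧ '"' ∉ w := by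
  obtain ⟨u, v, e, hu⟩ := pvSplitFirst cs.reverse (by simpa using h)
  refine ⟨v.reverse, u.reverse, ?_, by simpa using hu⟩
  have : cs = (u ++ '"' :: v).reverse := by rw [← e]; simp
  simpa using this


-- ---- slice computations ----
theorem pvSliceNil (a b : Option Int) : PySem.List.slice ([] : List Char) a b = [] := by
  cases h : PySem.List.slice ([] : List Char) a b with
  | nil => rfl
  | cons y ys =>
    exfalso
    have hy : y ∈ PySem.List.slice ([] : List Char) a b := by rw [h]; simp
    simpa using PySem.List.mem_of_mem_slice _ _ _ hy

theorem pvSliceFromIdx (P v : List Char) (c : Char) (a : Int) (ha : a = P.length + 1) :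
    PySem.List.slice (P ++ c :: v) (some a) none = v := by
  rw [PySem.List.slice_from _ (by omega)]
  rw [show a.toNat = (P ++ [c]).length by simp; omega]
  rw [show P ++ c :: v = (P ++ [c]) ++ v by simp]
  exact List.drop_left

theorem pvSliceBetween (P v w : List Char) (c : Char) (a b : Int)
    (ha : a = P.length + 1) (hb : b = P.length + 1 + v.length) :
    PySem.List.slice (P ++ c :: (v ++ w)) (some a) (some b) = v := by
  rw [PySem.List.slice_toNat _ (by omega) (by omega)]
  rw [show P ++ c :: (v ++ w) = (P ++ [c]) ++ (v ++ w) by simp]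
  rw [show a.toNat = (P ++ [c]).length by simp; omega]
  rw [List.drop_left]
  rw [show b.toNat - (P ++ [c]).length = v.length by simp; omega]
  exact List.take_left

theorem pvSlicePrefix (v w : List Char) (b : Int) (hb : b = v.length) :
    PySem.List.slice (v ++ w) (some 0) (some b) = v := by
  rw [PySem.List.slice_toNat _ (by omega) (by omega)]
  rw [show b.toNat - (0 : Int).toNat = v.length by omega]
  simp

theorem pvSliceAll (v : List Char) (b : Int) (hb : b = v.length) :
    PySem.List.slice v (some 0) (some b) = v := by
  rw [PySem.List.slice_toNat _ (by omega) (by omega)]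
  rw [show b.toNat - (0 : Int).toNat = v.length by omega]
  simp

theorem pvLq3_quote_cons (r : List Char) (j lq : Int) :
    pvLq3 ('"' :: r) j lq = pvLq3 r (j + 1) (j + 1) := by simp [pvLq3]


theorem pvStep0q (T M : List Char) (i lq mq : Int) :
    pvStepA ⟨T, M, false, false, false, i, lq, mq⟩ '"' = ⟨T, M, true, false, false, i + 1, lq, mq⟩ := by
  simp [pvStepA]

theorem pvStep1q (T M : List Char) (i lq mq : Int) :
    pvStepA ⟨T, M, true, false, false, i, lq, mq⟩ '"' = ⟨T, M, true, true, false, i + 1, lq, mq⟩ := by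
  simp [pvStepA]

theorem pvStep2q (T M : List Char) (i lq mq : Int) :
    pvStepA ⟨T, M, true, true, false, i, lq, mq⟩ '"' = ⟨T, M, true, true, true, i + 1, lq, i + 1⟩ := by
  simp [pvStepA]

theorem pvGetLastCons (x y z t : Int) (l : List Int) :
    PySem.List.pyGetD (x :: y :: z :: (l ++ [t])) (-1) 0 = t := by
  rw [show x :: y :: z :: (l ++ [t]) = (x :: y :: z :: l) ++ [t] by simp]
  exact PySem.List.pyGetD_neg_one_append_singleton _ _ _

theorem pvGetD1 (x y : Int) (l : List Int) : PySem.List.pyGetD (x :: y :: l) 1 0 = y := by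
  rw [PySem.List.pyGetD_ofNat']; rfl

theorem pvGetD2 (x y z : Int) (l : List Int) : PySem.List.pyGetD (x :: y :: z :: l) 2 0 = z := by
  rw [PySem.List.pyGetD_ofNat']; rfl

-- ---- the two ports agree, stated on the character list ----
theorem pvCore (cs : List Char) :
    (let s := cs.foldl pvStepA
      { topic := [], msg := [], tr := false, tp := false, mr := false,
        i := -1, lq := (cs.length : Int), mq := 0 }
     [("topic", String.ofList s.topic),
      ("message", String.ofList (PySem.List.slice s.msg (some 0) (some (s.lq - s.mq - 1))))]) =
    (let quotes := pvQuotesFrom cs 0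
     let n := quotes.length
     let topic :=
       if 2 ≤ n then PySem.List.slice cs (some (PySem.List.pyGetD quotes 0 0 + 1)) (some (PySem.List.pyGetD quotes 1 0))
       else if n = 1 then PySem.List.slice cs (some (PySem.List.pyGetD quotes 0 0 + 1)) none
       else []
     let message :=
       if 4 ≤ n then PySem.List.slice cs (some (PySem.List.pyGetD quotes 2 0 + 1)) (some (PySem.List.pyGetD quotes (-1) 0))
       else if n = 3 then PySem.List.slice cs (some (PySem.List.pyGetD quotes 2 0 + 1)) none
       else []
     [("topic", String.ofList topic), ("message", String.ofList message)]) := by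
  dsimp only
  by_cases h0 : '"' ∈ cs
  · obtain ⟨u0, v1, e1, hu0⟩ := pvSplitFirst cs h0
    subst e1
    by_cases h1 : '"' ∈ v1
    · obtain ⟨u1, v2, e2, hu1⟩ := pvSplitFirst v1 h1
      subst e2
      by_cases h2 : '"' ∈ v2
      · obtain ⟨u2, v3, e3, hu2⟩ := pvSplitFirst v2 h2
        subst e3
        by_cases h3 : '"' ∈ v3
        · obtain ⟨m, w, e4, hw⟩ := pvSplitLast v3 h3
          subst e4
          rw [List.foldl_append, pvFoldA0 u0 hu0, List.foldl_cons, pvStep0q,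
              List.foldl_append, pvFoldA1 u1 hu1, List.foldl_cons, pvStep1q,
              List.foldl_append, pvFoldA2 u2 hu2, List.foldl_cons, pvStep2q,
              pvFoldA3, pvLq3_append, pvLq3_quote_cons, pvLq3_noq w hw]
          simp only [pvQf_append, pvQf_quote_cons, pvQf_noq u0 hu0, pvQf_noq u1 hu1,
            pvQf_noq u2 hu2, pvQf_noq w hw, List.nil_append]
          rw [PySem.List.pyGetD_zero_cons, pvGetD1, pvGetD2, pvGetLastCons]
          rw [pvSlicePrefix m ('"' :: w) _ (by omega)]
          split_ifs with hA hB hC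
          · rw [pvSliceBetween u0 u1 ('"' :: (u2 ++ '"' :: (m ++ '"' :: w))) '"' _ _ (by omega) (by omega)]
            rw [show u0 ++ '"' :: (u1 ++ '"' :: (u2 ++ '"' :: (m ++ '"' :: w))) =
                  (u0 ++ '"' :: (u1 ++ '"' :: u2)) ++ '"' :: (m ++ '"' :: w) from by simp]
            rw [pvSliceBetween (u0 ++ '"' :: (u1 ++ '"' :: u2)) m ('"' :: w) '"' _ _ (by simp; omega) (by simp; omega)]
          all_goals (exfalso; simp only [List.length_cons, List.length_append, List.length_cons, List.length_nil] at *; try omega)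
        · rw [List.foldl_append, pvFoldA0 u0 hu0, List.foldl_cons, pvStep0q,
              List.foldl_append, pvFoldA1 u1 hu1, List.foldl_cons, pvStep1q,
              List.foldl_append, pvFoldA2 u2 hu2, List.foldl_cons, pvStep2q,
              pvFoldA3, pvLq3_noq v3 h3]
          simp only [pvQf_append, pvQf_quote_cons, pvQf_noq u0 hu0, pvQf_noq u1 hu1,
            pvQf_noq u2 hu2, pvQf_noq v3 h3, List.nil_append]
          rw [PySem.List.pyGetD_zero_cons, pvGetD1, pvGetD2,
              pvSliceAll v3 _ (by simp; omega)]
          norm_num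
          rw [pvSliceBetween u0 u1 ('"' :: (u2 ++ '"' :: v3)) '"' _ _ (by omega) (by omega),
              show u0 ++ '"' :: (u1 ++ '"' :: (u2 ++ '"' :: v3)) =
                (u0 ++ '"' :: (u1 ++ '"' :: u2)) ++ '"' :: v3 from by simp,
              pvSliceFromIdx (u0 ++ '"' :: (u1 ++ '"' :: u2)) v3 '"' _
                (by simp only [List.length_append, List.length_cons]; omega)]
          exact ⟨rfl, rfl⟩
      · rw [List.foldl_append, pvFoldA0 u0 hu0, List.foldl_cons, pvStep0q,
            List.foldl_append, pvFoldA1 u1 hu1, List.foldl_cons, pvStep1q,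
            pvFoldA2 v2 h2]
        simp only [pvQf_append, pvQf_quote_cons, pvQf_noq u0 hu0, pvQf_noq u1 hu1,
          pvQf_noq v2 h2, List.nil_append]
        rw [PySem.List.pyGetD_zero_cons, pvGetD1, pvSliceNil]
        norm_num
        rw [pvSliceBetween u0 u1 ('"' :: v2) '"' _ _ (by omega) (by omega)]
    · rw [List.foldl_append, pvFoldA0 u0 hu0, List.foldl_cons, pvStep0q, pvFoldA1 v1 h1]
      simp only [pvQf_append, pvQf_quote_cons, pvQf_noq u0 hu0, pvQf_noq v1 h1,
        List.nil_append]
      rw [PySem.List.pyGetD_zero_cons, pvSliceNil]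
      norm_num
      rw [pvSliceFromIdx u0 v1 '"' _ (by omega)]
  · rw [pvFoldA0 cs h0, pvQf_noq cs h0]
    simp [pvSliceNil]

-- ===== VERDICT (by name: the statement is the Claim_ definition above) =====
theorem extract_topic_message_without_regex_spec : Claim_equal_extract_topic_message_without_regex := by
  intro line _
  unfold Spec_extract_topic_message_without_regex extract_topic_message_without_regex extract_topic_message_without_regex_alt
  rw [PySem.Str.len_eq]
  exact pvCore line.toList
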